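-- pv_equiv track=rewrite | github.com/UF-Xie-Lab/CLASHub | PyScript/CLASHub.py | check_bartel_filters
-- ===== SOURCE A (Python) =====
-- def check_bartel_filters(row):
--     """
--     David Bartel Lab (Hall et al., NAR 2025) High-Confidence Criteria:
--     1. Seed (nt 2-8): >= 4 continuous Watson-Crick matches ('|').
--     2. 3' Region (nt 9-end): >= 10 continuous Watson-Crick matches ('|').
--     3. Offset: -4 to +6.
--     """
--     try:
--         mir_seq = str(row['miRNA_seq_5p_3p'])
--         tar_seq = str(row['target_seq_3p_5p'])
--         pattern = str(row['pairing_pattern'])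
--
--         # ==========================================================
--         # Step 1: Find the boundary of nt 8 (tem_num)
--         # ==========================================================
--         # Logic: Iterate until we find the index covering the first 8 real nucleotides of miRNA
--         tem_num = 8
--         # Safety check: prevent infinite loop if seq is weirdly short or all gaps
--         max_len = len(mir_seq)
--         while tem_num <= max_len and len(mir_seq[:tem_num].replace("-","")) < 8:
--             tem_num += 1
--
--         if tem_num > max_len: return False
--
--         # ==========================================================
--         # Step 2: Strict Continuity Check
--         # ==========================================================
--         # Seed Region: pattern[1:tem_num] (corresponds to nt 2 to nt 8)
--         # 3' Region: pattern[tem_num:] (corresponds to nt 9 to end)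
--
--         seed_region_pattern = pattern[1:tem_num]
--         three_p_region_pattern = pattern[tem_num:]
--
--         # Criteria 1: Seed must have "||||" (Strict, no spaces allowed)
--         if "||||" not in seed_region_pattern:
--             return False
--
--         # Criteria 2: 3' must have "||||||||||" (Strict)
--         if ("|" * 10) not in three_p_region_pattern:
--             return False
--
--         # ==========================================================
--         # Step 3: Precise Offset Calculation (Spacer Length Difference)
--         # ==========================================================
--
--         # 1. Locate the END of the Seed Match
--         # We look for the LAST occurrence of "||||" in the seed region
--         rel_seed_end = seed_region_pattern.rfind("||||")
--
--         # Absolute Index = Slice Start (1) + Relative Index + 3 (to get to the 4th pipe)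
--         real_seed_end_idx = 1 + rel_seed_end + 3
--
--         # 2. Locate the START of the 3' Match
--         # We look for the FIRST occurrence of "||||||||||" in the 3' region
--         rel_3p_start = three_p_region_pattern.find("|" * 10)
--
--         # Absolute Index = Slice Start (tem_num) + Relative Index
--         real_3p_start_idx = tem_num + rel_3p_start
--
--         # 3. Extract the Spacer Segment
--         # Range: From the character AFTER Seed Match to the character BEFORE 3' Match
--         spacer_slice_start = real_seed_end_idx + 1
--         spacer_slice_end = real_3p_start_idx
--
--         # Logical check: 3' match should not start before seed match ends
--         if spacer_slice_start > spacer_slice_end: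
--             return False
--
--         # Extract segments from miRNA and Target (Since they are aligned)
--         mir_spacer_segment = mir_seq[spacer_slice_start : spacer_slice_end]
--         tar_spacer_segment = tar_seq[spacer_slice_start : spacer_slice_end]
--
--         # 4. Calculate Biological Length (Remove gaps '-' and spaces ' ')
--         # Note: Pattern spaces don't matter here, we count nucleotides in Sequence.
--         len_mir_spacer = len(mir_spacer_segment.replace("-", "").replace(" ", ""))
--         len_tar_spacer = len(tar_spacer_segment.replace("-", "").replace(" ", ""))
--
--         # 5. Calculate Offset
--         offset = len_tar_spacer - len_mir_spacer
--
--         return -4 <= offset <= 6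
--
--     except Exception:
--         # Return False for any unexpected data issues to avoid crashing
--         return False
-- ===== SOURCE B (Python) =====
-- def _runs(s):
--     # maximal runs of consecutive '|' in s, as (start_index, length)
--     out = []
--     i, n = 0, len(s)
--     while i < n:
--         if s[i] == '|':
--             j = i + 1
--             while j < n and s[j] == '|':
--                 j += 1
--             out.append((i, j - i))
--             i = j
--         else:
--             i += 1
--     return out
--
--
-- def _bio_len(seg):
--     # nucleotide count: everything except gaps '-' and spaces
--     return sum(1 for c in seg if c != '-' and c != ' ')
--
--
-- def check_bartel_filters(row):
--     try:
--         mir_seq = str(row['miRNA_seq_5p_3p'])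
--         tar_seq = str(row['target_seq_3p_5p'])
--         pattern = str(row['pairing_pattern'])
--     except KeyError:
--         return False
--
--     # tem_num = smallest t >= 8 whose prefix mir_seq[:t] holds 8 non-gap chars
--     # i.e. max(8, 1-based position of the 8th non-'-' character)
--     if len(mir_seq) < 8:
--         return False
--     count = 0
--     tem_num = None
--     for i, c in enumerate(mir_seq):
--         if c != '-':
--             count += 1
--             if count == 8:
--                 tem_num = i + 1
--                 break
--     if tem_num is None:
--         return False
--     tem_num = max(8, tem_num)
--
--     rs = _runs(pattern)
--
--     # Seed criterion: a run clipped to [1, tem_num) of length >= 4;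
--     # seed_end = last '|' index of the rightmost such clipped run
--     seed_hits = []
--     for a, l in rs:
--         lo = max(a, 1)
--         hi = min(a + l, tem_num)
--         if hi - lo >= 4:
--             seed_hits.append(hi - 1)
--     if not seed_hits:
--         return False
--     seed_end = seed_hits[-1]
--
--     # 3' criterion: leftmost run clipped to [tem_num, len) of length >= 10;
--     # its clipped start is where the 3' match begins
--     three_start = None
--     for a, l in rs:
--         lo = max(a, tem_num)
--         if a + l - lo >= 10:
--             three_start = lo
--             break
--     if three_start is None:
--         return False
--
--     lo, hi = seed_end + 1, three_start
--     if lo > hi: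
--         return False
--     offset = _bio_len(tar_seq[lo:hi]) - _bio_len(mir_seq[lo:hi])
--     return -4 <= offset <= 6
-- ===== Notes on version B (the rewrite author's own statement) =====
-- stated objective: alternative
-- what changed: B decomposes the pairing pattern once into maximal runs of '|' (start,length) and decides the seed and 3' criteria by clipping runs at the nt-8 boundary (rightmost clipped run >=4 gives the seed end, leftmost clipped run >=10 gives the 3' start), replacing A's slice + substring in/rfind/find searches; tem_num comes from locating the 8th non-gap character in one scan instead of repeatedly re-slicing and re-counting the prefix, and spacer lengths are counted in one pass instead of two chained replace() copies.
import Mathlib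
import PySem

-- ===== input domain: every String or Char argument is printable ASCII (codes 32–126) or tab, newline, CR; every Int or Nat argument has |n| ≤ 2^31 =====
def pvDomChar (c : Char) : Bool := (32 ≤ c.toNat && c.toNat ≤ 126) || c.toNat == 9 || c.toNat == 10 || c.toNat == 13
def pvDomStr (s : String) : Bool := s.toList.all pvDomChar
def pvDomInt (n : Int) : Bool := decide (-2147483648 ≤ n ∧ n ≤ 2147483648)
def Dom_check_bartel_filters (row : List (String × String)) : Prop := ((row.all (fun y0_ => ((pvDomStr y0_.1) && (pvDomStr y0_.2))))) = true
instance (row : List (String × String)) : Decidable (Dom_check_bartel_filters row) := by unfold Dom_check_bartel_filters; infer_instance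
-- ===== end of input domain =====

-- B re-implements the Bartel high-confidence check by decomposing the pairing pattern into maximal '|'-runs
-- (clipped at the nt-8 boundary) instead of A's slice + substring in/rfind/find searches; same return value.

-- ===== PORT A =====
def pvTemLoop (mir : String) (tem : Nat) : Nat :=
  if h : tem ≤ mir.toList.length ∧
      (PySem.Str.replace (PySem.Str.slice mir none (some (tem : Int))) "-" "").toList.length < 8 then
    pvTemLoop mir (tem + 1)
  else tem
termination_by mir.toList.length + 1 - tem
decreasing_by omega


def check_bartel_filters (row : List (String × String)) : Bool :=
  match (PySem.Dict.mk row).get? "miRNA_seq_5p_3p",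
        (PySem.Dict.mk row).get? "target_seq_3p_5p",
        (PySem.Dict.mk row).get? "pairing_pattern" with
  | some mir_seq, some tar_seq, some pattern =>
    let max_len := mir_seq.toList.length
    let tem_num := pvTemLoop mir_seq 8
    if tem_num > max_len then false
    else
      let seed_region := PySem.Str.slice pattern (some 1) (some (tem_num : Int))
      let three_p := PySem.Str.slice pattern (some (tem_num : Int)) none
      if !PySem.Str.isIn "||||" seed_region then false
      else if !PySem.Str.isIn "||||||||||" three_p then false
      else
        let rel_seed_end := PySem.Str.rfind seed_region "||||"
        let real_seed_end_idx := 1 + rel_seed_end + 3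
        let rel_3p_start := PySem.Str.find three_p "||||||||||"
        let real_3p_start_idx := (tem_num : Int) + rel_3p_start
        let sStart := real_seed_end_idx + 1
        let sEnd := real_3p_start_idx
        if sStart > sEnd then false
        else
          let mir_spacer := PySem.Str.slice mir_seq (some sStart) (some sEnd)
          let tar_spacer := PySem.Str.slice tar_seq (some sStart) (some sEnd)
          let len_mir := (PySem.Str.replace (PySem.Str.replace mir_spacer "-" "") " " "").toList.length
          let len_tar := (PySem.Str.replace (PySem.Str.replace tar_spacer "-" "") " " "").toList.length
          let offset : Int := (len_tar : Int) - (len_mir : Int)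
          decide (-4 ≤ offset ∧ offset ≤ 6)
  | _, _, _ => false


-- ===== PORT B =====
-- (pvRunsScan_ge is cited by pvRuns's decreasing_by)

def pvRunsScan (s : List Char) (j : Nat) : Nat :=
  if h : j < s.length then
    if s[j] = '|' then pvRunsScan s (j + 1) else j
  else j
termination_by s.length - j

theorem pvRunsScan_ge (s : List Char) (j : Nat) : j ≤ pvRunsScan s j := by
  unfold pvRunsScan
  split
  · split
    · have := pvRunsScan_ge s (j + 1); omega
    · exact le_refl j
  · exact le_refl j
termination_by s.length - j
decreasing_by omega

def pvRuns (s : List Char) (i : Nat) (out : List (Nat × Nat)) : List (Nat × Nat) :=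
  if h : i < s.length then
    if s[i] = '|' then
      let j := pvRunsScan s (i + 1)
      pvRuns s j (out ++ [(i, j - i)])
    else pvRuns s (i + 1) out
  else out
termination_by s.length - i
decreasing_by
  · have := pvRunsScan_ge s (i + 1); omega
  · omega


def pvNth8 : List Char → Nat → Nat → Option Nat
  | [], _, _ => none
  | c :: t, i, cnt =>
    if c ≠ '-' then
      if cnt + 1 = 8 then some (i + 1) else pvNth8 t (i + 1) (cnt + 1)
    else pvNth8 t (i + 1) cnt


def pvFirstThree : List (Nat × Nat) → Nat → Option Nat
  | [], _ => none
  | (a, l) :: t, tem =>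
    let lo := max a tem
    if 10 ≤ a + l - lo then some lo else pvFirstThree t tem


def pvBioLen (cs : List Char) : Nat := cs.countP (fun c => !(c == '-') && !(c == ' '))


def check_bartel_filters_alt (row : List (String × String)) : Bool :=
  match (PySem.Dict.mk row).get? "miRNA_seq_5p_3p" with
  | none => false
  | some mir_seq =>
  match (PySem.Dict.mk row).get? "target_seq_3p_5p" with
  | none => false
  | some tar_seq =>
  match (PySem.Dict.mk row).get? "pairing_pattern" with
  | none => false
  | some pattern =>
    if mir_seq.toList.length < 8 then false
    else
      match pvNth8 mir_seq.toList 0 0 with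
      | none => false
      | some p =>
        let tem_num := max 8 p
        let rs := pvRuns pattern.toList 0 []
        let seed_hits := rs.foldl (fun acc r =>
          let lo := max r.1 1
          let hi := min (r.1 + r.2) tem_num
          if 4 ≤ hi - lo then acc ++ [hi - 1] else acc) ([] : List Nat)
        match seed_hits.getLast? with
        | none => false
        | some seed_end =>
          match pvFirstThree rs tem_num with
          | none => false
          | some three_start =>
            let lo := seed_end + 1
            if lo > three_start then false
            else
              let offset : Int :=
                (pvBioLen (PySem.List.slice tar_seq.toList (some (lo : Int)) (some (three_start : Int))) : Int) -
                (pvBioLen (PySem.List.slice mir_seq.toList (some (lo : Int)) (some (three_start : Int))) : Int)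
              decide (-4 ≤ offset ∧ offset ≤ 6)
  


-- ===== PRECONDITION & SPEC =====
def Spec_check_bartel_filters (row : List (String × String)) (out : Bool) : Prop := out = check_bartel_filters_alt row
instance (row : List (String × String)) (out : Bool) : Decidable (Spec_check_bartel_filters row out) := by unfold Spec_check_bartel_filters; infer_instance

-- ===== CLAIM (what is proved, stated in full; the proofs are below) =====
def Claim_equal_check_bartel_filters : Prop := ∀ (row : List (String × String)), Dom_check_bartel_filters row → Spec_check_bartel_filters row (check_bartel_filters row)

-- ===== LEMMAS AND PROOFS =====
theorem pvReplaceGo_single (c : Char) : ∀ (fuel : Nat) (l acc : List Char), l.length ≤ fuel →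
    PySem.Chars.replace.go [c] [] fuel l acc = acc.reverse ++ l.filter (fun x => !(x == c)) := by
  intro fuel
  induction fuel with
  | zero => intro l acc h; cases l with
    | nil => simp [PySem.Chars.replace.go]
    | cons a t => simp at h
  | succ n ih =>
    intro l acc h
    cases l with
    | nil => simp [PySem.Chars.replace.go]
    | cons a t =>
      simp only [PySem.Chars.replace.go]
      simp only [List.length_cons] at h
      by_cases hc : a = c
      · have hp : [c].isPrefixOf (a :: t) = true := by simp [List.isPrefixOf, hc]
        rw [if_pos hp]
        simp only [List.length_cons, List.length_nil, List.drop_succ_cons, List.drop_zero,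
          List.reverse_nil, List.nil_append]
        rw [ih _ _ (by omega)]
        simp [hc]
      · have hp : [c].isPrefixOf (a :: t) = false := by
          simp [List.isPrefixOf]; exact fun hh => (hc hh.symm).elim
        rw [hp]
        simp only [Bool.false_eq_true, if_false]
        rw [ih _ _ (by omega)]
        simp [hc]

theorem pvReplace_single (s : List Char) (c : Char) :
    PySem.Chars.replace s [c] [] = s.filter (fun x => !(x == c)) := by
  rw [PySem.Chars.replace]
  simp only [List.isEmpty_cons, Bool.false_eq_true, if_false]
  simpa using pvReplaceGo_single c s.length s [] le_rfl



theorem pvRunsScan_spec (s : List Char) (j : Nat) (hj : j ≤ s.length) :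
    j ≤ pvRunsScan s j ∧ pvRunsScan s j ≤ s.length ∧
      (∀ m, j ≤ m → m < pvRunsScan s j → s[m]? = some '|') ∧
      (pvRunsScan s j = s.length ∨ s[pvRunsScan s j]? ≠ some '|') := by
  induction j using pvRunsScan.induct s with
  | case1 j h hp ih =>
    rw [pvRunsScan, dif_pos h, if_pos hp]
    obtain ⟨ih1, ih2, ih3, ih4⟩ := ih (by omega)
    refine ⟨by omega, ih2, ?_, ih4⟩
    intro m hm1 hm2
    rcases Nat.eq_or_lt_of_le hm1 with rfl | h'
    · simp [List.getElem?_eq_getElem h, hp]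
    · exact ih3 m h' hm2
  | case2 j h hp =>
    rw [pvRunsScan, dif_pos h, if_neg hp]
    refine ⟨le_rfl, by omega, by omega, Or.inr ?_⟩
    rw [List.getElem?_eq_getElem h]
    simpa using hp
  | case3 j h =>
    rw [pvRunsScan, dif_neg h]
    exact ⟨le_rfl, by omega, by omega, Or.inl (by omega)⟩

theorem pvRuns_pre (s : List Char) (i : Nat) (out : List (Nat × Nat)) :
    ∀ pre, pvRuns s i (pre ++ out) = pre ++ pvRuns s i out := by
  induction i, out using pvRuns.induct s with
  | case1 i out h hp jj ih =>
    intro pre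
    rw [pvRuns.eq_def, dif_pos h, if_pos hp]
    conv_rhs => rw [pvRuns.eq_def, dif_pos h, if_pos hp]
    simp only
    rw [List.append_assoc]
    exact ih pre
  | case2 i out h hp ih =>
    intro pre
    rw [pvRuns.eq_def, dif_pos h, if_neg hp]
    conv_rhs => rw [pvRuns.eq_def, dif_pos h, if_neg hp]
    exact ih pre
  | case3 i out h =>
    intro pre
    rw [pvRuns.eq_def, dif_neg h]
    conv_rhs => rw [pvRuns.eq_def, dif_neg h]

theorem pvRuns_acc (s : List Char) (i : Nat) (out : List (Nat × Nat)) :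
    pvRuns s i out = out ++ pvRuns s i [] := by
  simpa using pvRuns_pre s i [] out

def pvRunGood (s : List Char) (r : Nat × Nat) : Prop :=
  1 ≤ r.2 ∧ r.1 + r.2 ≤ s.length ∧ (∀ m, r.1 ≤ m → m < r.1 + r.2 → s[m]? = some '|') ∧
  (r.1 + r.2 = s.length ∨ s[r.1 + r.2]? ≠ some '|')

theorem pvRuns_main (s : List Char) (i : Nat) (out : List (Nat × Nat)) :
    (∀ r ∈ pvRuns s i [], i ≤ r.1 ∧ pvRunGood s r ∧ (r.1 = i ∨ s[r.1 - 1]? ≠ some '|')) ∧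
    (∀ m, i ≤ m → m < s.length → s[m]? = some '|' → ∃ r ∈ pvRuns s i [], r.1 ≤ m ∧ m < r.1 + r.2) ∧
    (pvRuns s i []).Pairwise (fun p q => p.1 + p.2 < q.1) := by
  induction i, out using pvRuns.induct s with
  | case1 i out h hp jj ih =>
    simp only [show jj = pvRunsScan s (i + 1) from rfl] at ih
    clear jj
    set j := pvRunsScan s (i + 1) with hjdef
    obtain ⟨hs1, hs2, hs3, hs4⟩ := pvRunsScan_spec s (i + 1) (by omega)
    have hR : pvRuns s i [] = (i, j - i) :: pvRuns s j [] := by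
      rw [pvRuns.eq_def, dif_pos h, if_pos hp]
      simpa using pvRuns_acc s j [(i, j - i)]
    obtain ⟨ih1, ih2, ih3⟩ := ih
    have hij : i + (j - i) = j := by omega
    have hpi : s[i]? = some '|' := by rw [List.getElem?_eq_getElem h, hp]
    have hne : ∀ r ∈ pvRuns s j [], j < r.1 := by
      intro r hr
      obtain ⟨hjr, ⟨hg1, hg2, hg3, _⟩, _⟩ := ih1 r hr
      rcases Nat.eq_or_lt_of_le hjr with heq | hlt
      · exfalso
        have hpr : s[r.1]? = some '|' := hg3 r.1 le_rfl (by omega)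
        rcases hs4 with h4 | h4
        · omega
        · rw [← heq, hjdef] at hpr; exact h4 hpr
      · exact hlt
    refine ⟨?_, ?_, ?_⟩
    · intro r hr
      rw [hR] at hr
      rcases List.mem_cons.mp hr with rfl | hr
      · refine ⟨le_rfl, ⟨by omega, by rw [hij]; exact hs2, ?_, by rw [hij]; exact hs4⟩, Or.inl rfl⟩
        intro m hm1 hm2
        simp only at hm1 hm2 ⊢
        rcases Nat.eq_or_lt_of_le hm1 with rfl | h'
        · exact hpi
        · exact hs3 m h' (by omega)
      · obtain ⟨hjr, hg, hlm⟩ := ih1 r hr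
        refine ⟨by omega, hg, ?_⟩
        rcases hlm with heq | hnp
        · exact absurd heq (by have := hne r hr; omega)
        · exact Or.inr hnp
    · intro m hm1 hm2 hm3
      by_cases hmj : m < j
      · exact ⟨(i, j - i), by rw [hR]; exact List.mem_cons_self, by simpa using hm1, by simpa using (by omega : m < i + (j - i))⟩
      · obtain ⟨r, hr, hc⟩ := ih2 m (by omega) hm2 hm3
        exact ⟨r, by rw [hR]; exact List.mem_cons_of_mem _ hr, hc⟩
    · rw [hR]
      refine List.Pairwise.cons ?_ ih3
      intro r hr
      simpa [hij] using hne r hr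
  | case2 i out h hp ih =>
    have hR : pvRuns s i [] = pvRuns s (i + 1) [] := by
      rw [pvRuns.eq_def, dif_pos h, if_neg hp]
    obtain ⟨ih1, ih2, ih3⟩ := ih
    have hpi : s[i]? ≠ some '|' := by
      rw [List.getElem?_eq_getElem h]
      simpa using hp
    refine ⟨?_, ?_, by rw [hR]; exact ih3⟩
    · intro r hr
      rw [hR] at hr
      obtain ⟨hjr, hg, hlm⟩ := ih1 r hr
      refine ⟨by omega, hg, Or.inr ?_⟩
      rcases hlm with heq | hnp
      · rw [heq]; simpa using hpi
      · exact hnp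
    · intro m hm1 hm2 hm3
      rcases Nat.eq_or_lt_of_le hm1 with rfl | h'
      · exact absurd hm3 hpi
      · obtain ⟨r, hr, hc⟩ := ih2 m (by omega) hm2 hm3
        exact ⟨r, by rw [hR]; exact hr, hc⟩
  | case3 i out h =>
    have hR : pvRuns s i [] = [] := by rw [pvRuns.eq_def, dif_neg h]
    rw [hR]
    exact ⟨by simp, fun m hm1 hm2 _ => absurd (by omega : i < s.length) h, List.Pairwise.nil⟩

def pvWin (s : List Char) (k i : Nat) : Prop :=
  i + k ≤ s.length ∧ ∀ m, i ≤ m → m < i + k → s[m]? = some '|'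

theorem pvWin_iff (s : List Char) (k i : Nat) (hk : 1 ≤ k) :
    List.replicate k '|' <+: s.drop i ↔ pvWin s k i := by
  rw [List.prefix_iff_eq_take]
  simp only [List.length_replicate]
  constructor
  · intro hEq
    have hlen := congrArg List.length hEq
    simp only [List.length_replicate, List.length_take, List.length_drop] at hlen
    have hik : i + k ≤ s.length := by
      rcases Nat.le_total k (s.length - i) with h | h <;> omega
    refine ⟨hik, fun m hm1 hm2 => ?_⟩
    have hmi : m - i < k := by omega
    have h1 : (List.replicate k '|')[m - i]? = some '|' := by simp [hmi]
    rw [hEq, List.getElem?_take, if_pos hmi, List.getElem?_drop,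
      Nat.add_sub_cancel' hm1] at h1
    exact h1
  · rintro ⟨h1, h2⟩
    apply List.ext_getElem?
    intro m
    rw [List.getElem?_take]
    by_cases hm : m < k
    · rw [List.getElem?_replicate, if_pos hm, if_pos hm, List.getElem?_drop]
      exact (h2 (i + m) (by omega) (by omega)).symm
    · rw [List.getElem?_replicate, if_neg hm, if_neg hm]

-- window covered by a run
theorem pvWin_to_run (s : List Char) (k i : Nat) (hk : 1 ≤ k) (hw : pvWin s k i) :
    ∃ r ∈ pvRuns s 0 [], r.1 ≤ i ∧ i + k ≤ r.1 + r.2 := by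
  obtain ⟨h1, h2⟩ := hw
  obtain ⟨main1, main2, _⟩ := pvRuns_main s 0 []
  obtain ⟨r, hr, hc1, hc2⟩ := main2 i (Nat.zero_le i) (by omega) (h2 i le_rfl (by omega))
  refine ⟨r, hr, hc1, ?_⟩
  by_contra hcon
  push_neg at hcon
  obtain ⟨_, ⟨hg1, hg2, hg3, hg4⟩, _⟩ := main1 r hr
  have hin : r.1 + r.2 < i + k := hcon
  have hpipe : s[r.1 + r.2]? = some '|' := h2 (r.1 + r.2) (by omega) (by omega)
  rcases hg4 with hEq | hne
  · omega
  · exact hne hpipe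

theorem pvRun_to_win (s : List Char) (k i : Nat) (r : Nat × Nat) (hr : r ∈ pvRuns s 0 [])
    (h1 : r.1 ≤ i) (h2 : i + k ≤ r.1 + r.2) : pvWin s k i := by
  obtain ⟨main1, _, _⟩ := pvRuns_main s 0 []
  obtain ⟨_, ⟨hg1, hg2, hg3, _⟩, _⟩ := main1 r hr
  exact ⟨by omega, fun m hm1 hm2 => hg3 m (by omega) (by omega)⟩

-- rfind.go characterization
theorem pvRfindGo_eq (s sub : List Char) (a : Nat) :
    ∀ m, a ≤ m → sub <+: s.drop a → (∀ i, a < i → i ≤ m → ¬ sub <+: s.drop i) →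
      PySem.Chars.rfind.go s sub m = (a : Int) := by
  intro m
  induction m with
  | zero =>
    intro ha hp _
    have : a = 0 := by omega
    subst this
    simp only [PySem.Chars.rfind.go]
    rw [if_pos (by simpa [List.isPrefixOf_iff_prefix] using hp)]
    simp
  | succ n ih =>
    intro ha hp hmax
    simp only [PySem.Chars.rfind.go]
    rcases Nat.eq_or_lt_of_le ha with rfl | hlt
    · rw [if_pos (by simpa [List.isPrefixOf_iff_prefix] using hp)]
    · rw [if_neg (by simpa [List.isPrefixOf_iff_prefix] using hmax (n+1) hlt le_rfl)]
      exact ih (by omega) hp (fun i h1 h2 => hmax i h1 (by omega))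

theorem pvRfind_eq (s sub : List Char) (a : Nat) (ha : a ≤ s.length)
    (hp : sub <+: s.drop a) (hmax : ∀ i, a < i → ¬ sub <+: s.drop i) :
    PySem.Chars.rfind s sub = (a : Int) :=
  pvRfindGo_eq s sub a s.length ha hp (fun i h1 _ => hmax i h1)

theorem pvFind_eq (s sub : List Char) (a : Nat)
    (hp : sub <+: s.drop a) (hmin : ∀ i, i < a → ¬ sub <+: s.drop i) :
    PySem.Chars.find s sub = (a : Int) := by
  have hinf : sub <:+: s := by
    have h1 : sub <:+: s.drop a := hp.isInfix
    exact h1.trans (List.drop_suffix a s).isInfix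
  have hnn : 0 ≤ PySem.Chars.find s sub := (PySem.Chars.find_nonneg_iff s sub).mpr hinf
  obtain ⟨hf1, hf2⟩ := PySem.Chars.find_spec hnn
  have h1 : ¬ (PySem.Chars.find s sub).toNat < a := fun hc => hmin _ hc hf1
  have h2 : ¬ a < (PySem.Chars.find s sub).toNat := fun hc => hf2 a hc hp
  omega

theorem pvFirstThree_none : ∀ (rs : List (Nat × Nat)) (T : Nat), pvFirstThree rs T = none →
    ∀ r ∈ rs, ¬ (10 ≤ r.1 + r.2 - max r.1 T) := by
  intro rs
  induction rs with
  | nil => intro T _ r hr; simp at hr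
  | cons a t ih =>
    intro T h r hr
    obtain ⟨a1, a2⟩ := a
    rw [pvFirstThree] at h
    split at h
    · exact absurd h (by simp)
    · rcases List.mem_cons.mp hr with rfl | hr
      · assumption
      · exact ih T h r hr

theorem pvFirstThree_some : ∀ (rs : List (Nat × Nat)) (T thr : Nat),
    rs.Pairwise (fun p q => p.1 + p.2 < q.1) → pvFirstThree rs T = some thr →
    (∃ r ∈ rs, 10 ≤ r.1 + r.2 - max r.1 T ∧ thr = max r.1 T) ∧
    (∀ r ∈ rs, 10 ≤ r.1 + r.2 - max r.1 T → thr ≤ max r.1 T) := by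
  intro rs
  induction rs with
  | nil => intro T thr _ h; simp [pvFirstThree] at h
  | cons a t ih =>
    intro T thr hpw h
    obtain ⟨a1, a2⟩ := a
    rw [pvFirstThree] at h
    rw [List.pairwise_cons] at hpw
    split at h
    · rename_i hq
      injection h with h
      subst h
      refine ⟨⟨(a1, a2), List.mem_cons_self, hq, rfl⟩, ?_⟩
      intro r hr _
      rcases List.mem_cons.mp hr with rfl | hr
      · exact le_rfl
      · have h1 := hpw.1 r hr
        have h2 : a1 ≤ r.1 := by simp at h1; omega
        exact max_le_max_right T h2
    · rename_i hq
      obtain ⟨⟨r0, hr0, hq0, heq⟩, hmin⟩ := ih T thr hpw.2 h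
      refine ⟨⟨r0, List.mem_cons_of_mem _ hr0, hq0, heq⟩, ?_⟩
      intro r hr hqr
      rcases List.mem_cons.mp hr with rfl | hr
      · exact absurd hqr hq
      · exact hmin r hr hqr

theorem pvLastMax (key : Nat × Nat → Nat) : ∀ (l : List (Nat × Nat)),
    l.Pairwise (fun x y => key x < key y) → ∀ E, (l.map key).getLast? = some E →
    (∃ x ∈ l, key x = E) ∧ ∀ x ∈ l, key x ≤ E := by
  intro l
  induction l with
  | nil => intro _ E h; simp at h
  | cons a t ih =>
    intro hpw E h
    rw [List.pairwise_cons] at hpw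
    cases t with
    | nil =>
      simp at h
      subst h
      exact ⟨⟨a, List.mem_cons_self, rfl⟩, by simp⟩
    | cons b u =>
      rw [List.map_cons, List.map_cons, List.getLast?_cons_cons] at h
      obtain ⟨⟨x, hx, hxE⟩, hmax⟩ := ih hpw.2 E h
      refine ⟨⟨x, List.mem_cons_of_mem _ hx, hxE⟩, ?_⟩
      intro y hy
      rcases List.mem_cons.mp hy with rfl | hy
      · have := hpw.1 x hx
        omega
      · exact hmax y hy

theorem pvBioLen_eq (s : List Char) :
    (PySem.Chars.replace (PySem.Chars.replace s ['-'] []) [' '] []).length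
      = s.countP (fun c => !(c == '-') && !(c == ' ')) := by
  rw [pvReplace_single, pvReplace_single, List.filter_filter, ← List.countP_eq_length_filter]
  apply List.countP_congr
  intro c _
  simp [Bool.and_comm]

theorem pvCondA (mir : String) (t : Nat) :
    (PySem.Str.replace (PySem.Str.slice mir none (some (t : Int))) "-" "").toList.length
      = (mir.toList.take t).countP (fun c => !(c == '-')) := by
  have h1 : (PySem.Str.slice mir none (some (t : Int))).toList = mir.toList.take t := by
    simp [PySem.Str.slice, PySem.Chars.slice_eq_listSlice, PySem.List.slice_to_natCast]
  simp only [PySem.Str.replace, String.toList_ofList, h1]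
  have h2 : ("-" : String).toList = ['-'] := by decide
  have h3 : ("" : String).toList = [] := by decide
  rw [h2, h3, pvReplace_single]
  simp [List.countP_eq_length_filter]

theorem pvNth8_some (cs : List Char) : ∀ i cnt p, cnt < 8 → pvNth8 cs i cnt = some p →
    i + 1 ≤ p ∧ p - i ≤ cs.length ∧ (cs.take (p - i)).countP (fun c => !(c == '-')) + cnt = 8 ∧
    ∀ v, v < p - i → (cs.take v).countP (fun c => !(c == '-')) + cnt < 8 := by
  induction cs with
  | nil => intro i cnt p _ h; simp [pvNth8] at h
  | cons c t ih =>
    intro i cnt p hcnt h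
    rw [pvNth8] at h
    by_cases hc : c = '-'
    · rw [if_neg (by simp [hc])] at h
      obtain ⟨h1, h2, h3, h4⟩ := ih (i + 1) cnt p hcnt h
      have hpi : 1 ≤ p - i := by omega
      refine ⟨by omega, by simp; omega, ?_, ?_⟩
      · have hT : (c :: t).take (p - i) = c :: t.take (p - i - 1) := by
          obtain ⟨w, hw⟩ : ∃ w, p - i = w + 1 := ⟨p - i - 1, by omega⟩
          rw [hw, List.take_succ_cons]
          congr 1
        rw [hT, List.countP_cons, if_neg (by simp [hc])]
        rw [show p - (i + 1) = p - i - 1 by omega] at h3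
        omega
      · intro v hv
        cases v with
        | zero => simpa using by omega
        | succ w =>
          rw [List.take_succ_cons, List.countP_cons, if_neg (by simp [hc])]
          have := h4 w (by omega)
          omega
    · rw [if_pos (by simp [hc])] at h
      by_cases h8 : cnt + 1 = 8
      · rw [if_pos h8] at h
        injection h with h
        subst h
        refine ⟨le_rfl, by simp, ?_, ?_⟩
        · have h1 : (i + 1) - i = 1 := by omega
          rw [h1, List.take_succ_cons, List.take_zero, List.countP_cons,
            if_pos (by simp [hc])]
          simpa using by omega
        · intro v hv
          have hv0 : v = 0 := by omega
          subst hv0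
          simpa using by omega
      · rw [if_neg h8] at h
        obtain ⟨h1, h2, h3, h4⟩ := ih (i + 1) (cnt + 1) p (by omega) h
        have hpi : 2 ≤ p - i := by omega
        refine ⟨by omega, by simp; omega, ?_, ?_⟩
        · have hT : (c :: t).take (p - i) = c :: t.take (p - i - 1) := by
            obtain ⟨w, hw⟩ : ∃ w, p - i = w + 1 := ⟨p - i - 1, by omega⟩
            rw [hw, List.take_succ_cons]
            congr 1
          rw [hT, List.countP_cons, if_pos (by simp [hc])]
          rw [show p - (i + 1) = p - i - 1 by omega] at h3
          omega
        · intro v hv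
          cases v with
          | zero => simpa using by omega
          | succ w =>
            rw [List.take_succ_cons, List.countP_cons, if_pos (by simp [hc])]
            have := h4 w (by omega)
            omega

theorem pvNth8_none (cs : List Char) : ∀ i cnt, pvNth8 cs i cnt = none → cnt < 8 →
    cs.countP (fun c => !(c == '-')) + cnt < 8 := by
  induction cs with
  | nil => intro i cnt _ h; simpa using h
  | cons c t ih =>
    intro i cnt h hcnt
    rw [pvNth8] at h
    by_cases hc : c = '-'
    · rw [if_neg (by simp [hc])] at h
      have := ih (i + 1) cnt h hcnt
      rw [List.countP_cons, if_neg (by simp [hc])]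
      omega
    · rw [if_pos (by simp [hc])] at h
      by_cases h8 : cnt + 1 = 8
      · rw [if_pos h8] at h; exact absurd h (by simp)
      · rw [if_neg h8] at h
        have := ih (i + 1) (cnt + 1) h (by omega)
        rw [List.countP_cons, if_pos (by simp [hc])]
        omega

theorem pvTemLoop_spec (mir : String) : ∀ t : Nat,
    ((∀ u, t ≤ u → u ≤ mir.toList.length →
        (mir.toList.take u).countP (fun c => !(c == '-')) < 8) →
      pvTemLoop mir t = max t (mir.toList.length + 1)) ∧
    (∀ u, t ≤ u → u ≤ mir.toList.length →
        8 ≤ (mir.toList.take u).countP (fun c => !(c == '-')) →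
        (∀ v, t ≤ v → v < u → (mir.toList.take v).countP (fun c => !(c == '-')) < 8) →
      pvTemLoop mir t = u) := by
  intro t
  induction t using pvTemLoop.induct mir with
  | case1 x hcond ih =>
    rw [pvCondA] at hcond
    have hstep : pvTemLoop mir x = pvTemLoop mir (x + 1) := by
      rw [pvTemLoop.eq_def, dif_pos (by rw [pvCondA]; exact hcond)]
    constructor
    · intro h
      rw [hstep, ih.1 (fun u hu1 hu2 => h u (by omega) hu2)]
      omega
    · intro u hu1 hu2 hu3 hu4
      have hux : x < u := by
        rcases Nat.eq_or_lt_of_le hu1 with rfl | h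
        · omega
        · exact h
      rw [hstep]
      exact ih.2 u (by omega) hu2 hu3 (fun v hv1 hv2 => hu4 v (by omega) hv2)
  | case2 x hcond =>
    rw [pvCondA] at hcond
    have hstep : pvTemLoop mir x = x := by
      rw [pvTemLoop.eq_def, dif_neg (by rw [pvCondA]; exact hcond)]
    constructor
    · intro h
      by_cases hx : x ≤ mir.toList.length
      · exact absurd (h x le_rfl hx) (by omega)
      · rw [hstep]; omega
    · intro u hu1 hu2 hu3 hu4
      by_cases hx : x ≤ mir.toList.length
      · have h8 : 8 ≤ (mir.toList.take x).countP (fun c => !(c == '-')) := by omega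
        rcases Nat.eq_or_lt_of_le hu1 with rfl | hlt
        · exact hstep
        · exact absurd (hu4 x le_rfl hlt) (by omega)
      · omega


theorem pvSeedRegion_drop (pat : List Char) (T j : Nat) :
    List.replicate 4 '|' <+: ((pat.drop 1).take (T - 1)).drop j ↔
      (j + 1) + 4 ≤ T ∧ pvWin pat 4 (j + 1) := by
  rw [List.drop_take, List.drop_drop]
  rw [show j + 1 = 1 + j by omega] at *
  rw [List.prefix_take_iff, pvWin_iff pat 4 (1 + j) (by omega)]
  simp only [List.length_replicate]
  constructor
  · rintro ⟨h1, h2⟩; exact ⟨by omega, h1⟩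
  · rintro ⟨h1, h2⟩; exact ⟨h2, by omega⟩

theorem pvThreeRegion_drop (pat : List Char) (T j : Nat) :
    List.replicate 10 '|' <+: (pat.drop T).drop j ↔ pvWin pat 10 (T + j) := by
  rw [List.drop_drop]
  exact pvWin_iff pat 10 (T + j) (by omega)

theorem pvQual_of_win (pat : List Char) (T i : Nat) (h1 : 1 ≤ i) (h2 : i + 4 ≤ T)
    (hw : pvWin pat 4 i) :
    ∃ r ∈ pvRuns pat 0 [], 4 ≤ min (r.1 + r.2) T - max r.1 1 ∧ i + 3 ≤ min (r.1 + r.2) T - 1 := by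
  obtain ⟨r, hr, hc1, hc2⟩ := pvWin_to_run pat 4 i (by omega) hw
  exact ⟨r, hr, by omega, by omega⟩

theorem pvQual10_of_win (pat : List Char) (T i : Nat) (hT : T ≤ i) (hw : pvWin pat 10 i) :
    ∃ r ∈ pvRuns pat 0 [], 10 ≤ r.1 + r.2 - max r.1 T ∧ max r.1 T ≤ i := by
  obtain ⟨r, hr, hc1, hc2⟩ := pvWin_to_run pat 10 i (by omega) hw
  exact ⟨r, hr, by omega, by omega⟩

theorem pvSeed_none (pat : List Char) (T : Nat) (hT : 8 ≤ T)
    (h : ((pvRuns pat 0 []).filter (fun r => decide (4 ≤ min (r.1 + r.2) T - max r.1 1))).map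
        (fun r => min (r.1 + r.2) T - 1) = []) :
    PySem.Chars.isIn (List.replicate 4 '|') ((pat.drop 1).take (T - 1)) = false := by
  by_contra hcon
  have htrue : PySem.Chars.isIn (List.replicate 4 '|') ((pat.drop 1).take (T - 1)) = true := by
    cases hb : PySem.Chars.isIn (List.replicate 4 '|') ((pat.drop 1).take (T - 1))
    · exact absurd hb hcon
    · rfl
  obtain ⟨j, hj⟩ := (PySem.Chars.exists_prefix_drop_iff_isIn _ _).mpr htrue
  rw [pvSeedRegion_drop] at hj
  obtain ⟨r, hr, hq, _⟩ := pvQual_of_win pat T (j + 1) (by omega) hj.1 hj.2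
  rw [List.map_eq_nil_iff, List.filter_eq_nil_iff] at h
  exact h r hr (by simpa using hq)

theorem pvSeed_some (pat : List Char) (T E : Nat) (hT : 8 ≤ T)
    (h : (((pvRuns pat 0 []).filter (fun r => decide (4 ≤ min (r.1 + r.2) T - max r.1 1))).map
        (fun r => min (r.1 + r.2) T - 1)).getLast? = some E) :
    4 ≤ E ∧ E + 1 ≤ T ∧ E + 1 ≤ pat.length ∧
    PySem.Chars.rfind ((pat.drop 1).take (T - 1)) (List.replicate 4 '|') = ((E - 4 : Nat) : Int) ∧
    PySem.Chars.isIn (List.replicate 4 '|') ((pat.drop 1).take (T - 1)) = true := by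
  set R := pvRuns pat 0 [] with hR
  set l' := R.filter (fun r => decide (4 ≤ min (r.1 + r.2) T - max r.1 1)) with hl'
  obtain ⟨main1, main2, main3⟩ := pvRuns_main pat 0 []
  have hpw : l'.Pairwise (fun p q => p.1 + p.2 < q.1) := main3.sublist List.filter_sublist
  have hpw' : l'.Pairwise (fun x y => (fun r => min (r.1 + r.2) T - 1) x < (fun r => min (r.1 + r.2) T - 1) y) := by
    refine hpw.imp_of_mem ?_
    intro a b ha hb hab
    have hqa : 4 ≤ min (a.1 + a.2) T - max a.1 1 := by
      have := (List.mem_filter.mp ha).2; simpa using this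
    have hqb : 4 ≤ min (b.1 + b.2) T - max b.1 1 := by
      have := (List.mem_filter.mp hb).2; simpa using this
    simp only
    omega
  obtain ⟨⟨rl, hrl, hkey⟩, hmax⟩ := pvLastMax _ l' hpw' E h
  have hqrl : 4 ≤ min (rl.1 + rl.2) T - max rl.1 1 := by
    have := (List.mem_filter.mp hrl).2; simpa using this
  have hrlR : rl ∈ R := (List.mem_filter.mp hrl).1
  have hE4 : 4 ≤ E := by omega
  have hET : E + 1 ≤ T := by omega
  have hwin : pvWin pat 4 (E - 3) := by
    apply pvRun_to_win pat 4 (E - 3) rl hrlR (by omega) (by omega)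
  have hlen : E + 1 ≤ pat.length := by
    obtain ⟨hw1, _⟩ := hwin
    omega
  refine ⟨hE4, hET, hlen, ?_, ?_⟩
  · apply pvRfind_eq
    · simp only [List.length_take, List.length_drop]
      omega
    · rw [pvSeedRegion_drop, show E - 4 + 1 = E - 3 by omega]
      exact ⟨by omega, hwin⟩
    · intro j hj hpre
      rw [pvSeedRegion_drop] at hpre
      obtain ⟨r', hr', hq', hle'⟩ := pvQual_of_win pat T (j + 1) (by omega) hpre.1 hpre.2
      have hmem : r' ∈ l' := List.mem_filter.mpr ⟨hr', by simpa using hq'⟩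
      have := hmax r' hmem
      simp only at this
      omega
  · rw [← PySem.Chars.exists_prefix_drop_iff_isIn]
    exact ⟨E - 4, by rw [pvSeedRegion_drop, show E - 4 + 1 = E - 3 by omega]; exact ⟨by omega, hwin⟩⟩

theorem pvThree_none (pat : List Char) (T : Nat)
    (h : pvFirstThree (pvRuns pat 0 []) T = none) :
    PySem.Chars.isIn (List.replicate 10 '|') (pat.drop T) = false := by
  by_contra hcon
  have htrue : PySem.Chars.isIn (List.replicate 10 '|') (pat.drop T) = true := by
    cases hb : PySem.Chars.isIn (List.replicate 10 '|') (pat.drop T)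
    · exact absurd hb hcon
    · rfl
  obtain ⟨j, hj⟩ := (PySem.Chars.exists_prefix_drop_iff_isIn _ _).mpr htrue
  rw [pvThreeRegion_drop] at hj
  obtain ⟨r, hr, hq, _⟩ := pvQual10_of_win pat T (T + j) (by omega) hj
  exact pvFirstThree_none _ T h r hr hq

theorem pvThree_some (pat : List Char) (T thr : Nat)
    (h : pvFirstThree (pvRuns pat 0 []) T = some thr) :
    T ≤ thr ∧ thr + 10 ≤ pat.length ∧
    PySem.Chars.find (pat.drop T) (List.replicate 10 '|') = ((thr - T : Nat) : Int) ∧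
    PySem.Chars.isIn (List.replicate 10 '|') (pat.drop T) = true := by
  obtain ⟨main1, main2, main3⟩ := pvRuns_main pat 0 []
  obtain ⟨⟨r0, hr0, hq0, heq⟩, hmin⟩ := pvFirstThree_some _ T thr main3 h
  have hTthr : T ≤ thr := by rw [heq]; omega
  have hwin : pvWin pat 10 thr := by
    apply pvRun_to_win pat 10 thr r0 hr0 (by omega) (by omega)
  have hlen : thr + 10 ≤ pat.length := hwin.1
  refine ⟨hTthr, hlen, ?_, ?_⟩
  · apply pvFind_eq
    · rw [pvThreeRegion_drop, show T + (thr - T) = thr by omega]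
      exact hwin
    · intro j hj hpre
      rw [pvThreeRegion_drop] at hpre
      obtain ⟨r', hr', hq', hle'⟩ := pvQual10_of_win pat T (T + j) (by omega) hpre
      have := hmin r' hr' hq'
      omega
  · rw [← PySem.Chars.exists_prefix_drop_iff_isIn]
    exact ⟨thr - T, by rw [pvThreeRegion_drop, show T + (thr - T) = thr by omega]; exact hwin⟩

-- helper facts for assembly
theorem pvCntTakeMono (cs : List Char) (p : Char → Bool) (u v : Nat) (h : u ≤ v) :
    (cs.take u).countP p ≤ (cs.take v).countP p := by
  have h1 : cs.take u = (cs.take v).take u := by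
    rw [List.take_take, min_eq_left h]
  rw [h1]
  exact (List.take_sublist _ _).countP_le

theorem pvPipe4 : ("||||" : String).toList = List.replicate 4 '|' := by decide
theorem pvPipe10 : ("||||||||||" : String).toList = List.replicate 10 '|' := by decide

theorem pvStrLen2 (s : String) :
    (PySem.Str.replace (PySem.Str.replace s "-" "") " " "").toList.length = pvBioLen s.toList := by
  simp only [PySem.Str.replace, String.toList_ofList]
  rw [show ("-" : String).toList = ['-'] by decide, show ("" : String).toList = [] by decide,
    show (" " : String).toList = [' '] by decide]
  exact pvBioLen_eq s.toList

theorem pvSeedL (pat : String) (T : Nat) :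
    (PySem.Str.slice pat (some 1) (some (T : Int))).toList = (pat.toList.drop 1).take (T - 1) := by
  simp only [PySem.Str.slice, String.toList_ofList, PySem.Chars.slice_eq_listSlice]
  rw [show (1 : Int) = ((1 : Nat) : Int) by norm_num, PySem.List.slice_natCast]

theorem pvThreeL (pat : String) (T : Nat) :
    (PySem.Str.slice pat (some (T : Int)) none).toList = pat.toList.drop T := by
  simp only [PySem.Str.slice, String.toList_ofList, PySem.Chars.slice_eq_listSlice]
  rw [PySem.List.slice_from_natCast]

theorem pv_main (row : List (String × String)) :
    check_bartel_filters row = check_bartel_filters_alt row := by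
  rw [check_bartel_filters, check_bartel_filters_alt]
  cases hmir : (PySem.Dict.mk row).get? "miRNA_seq_5p_3p" with
  | none => rfl
  | some mir =>
  cases htar : (PySem.Dict.mk row).get? "target_seq_3p_5p" with
  | none => rfl
  | some tar =>
  cases hpat : (PySem.Dict.mk row).get? "pairing_pattern" with
  | none => rfl
  | some pat =>
  dsimp only
  by_cases hn : mir.toList.length < 8
  · -- B returns false; A's tem loop runs past the end
    rw [if_pos hn]
    have hA : pvTemLoop mir 8 = max 8 (mir.toList.length + 1) :=
      (pvTemLoop_spec mir 8).1 (fun u hu1 hu2 => by omega)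
    rw [hA, if_pos (by omega)]
  · rw [if_neg hn]
    cases hp8 : pvNth8 mir.toList 0 0 with
    | none =>
      have htot := pvNth8_none mir.toList 0 0 hp8 (by omega)
      have hA : pvTemLoop mir 8 = max 8 (mir.toList.length + 1) := by
        apply (pvTemLoop_spec mir 8).1
        intro u hu1 hu2
        have := (List.take_sublist u mir.toList).countP_le (p := fun c => !(c == '-'))
        omega
      rw [hA, if_pos (by omega)]
    | some p =>
      obtain ⟨hp1, hp2, hp3, hp4⟩ := pvNth8_some mir.toList 0 0 p (by omega) hp8
      simp only [Nat.sub_zero] at hp2 hp3 hp4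
      set T := max 8 p with hTdef
      have hA : pvTemLoop mir 8 = T := by
        apply (pvTemLoop_spec mir 8).2 T (by omega) (by omega)
        · have h1 : (mir.toList.take p).countP (fun c => !(c == '-')) ≤
              (mir.toList.take T).countP (fun c => !(c == '-')) :=
            pvCntTakeMono _ _ p T (by omega)
          omega
        · intro v hv1 hv2
          have : v < p := by omega
          have := hp4 v this
          omega
      rw [hA, if_neg (by omega)]
      dsimp only
      have hT8 : 8 ≤ T := by omega
      -- identify the seed-hits fold with its filter/map form
      have hfold : (pvRuns pat.toList 0 []).foldl (fun acc r =>
            let lo := max r.1 1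
            let hi := min (r.1 + r.2) T
            if 4 ≤ hi - lo then acc ++ [hi - 1] else acc) ([] : List Nat)
          = ((pvRuns pat.toList 0 []).filter
              (fun r => decide (4 ≤ min (r.1 + r.2) T - max r.1 1))).map
              (fun r => min (r.1 + r.2) T - 1) := by
        simpa using PySem.List.foldl_append_ite
          (p := fun r : Nat × Nat => 4 ≤ min (r.1 + r.2) T - max r.1 1)
          (f := fun r : Nat × Nat => min (r.1 + r.2) T - 1)
          (l := pvRuns pat.toList 0 []) (acc := [])
      rw [hfold]
      have hisin4 : PySem.Str.isIn "||||" (PySem.Str.slice pat (some 1) (some (T : Int)))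
          = PySem.Chars.isIn (List.replicate 4 '|') ((pat.toList.drop 1).take (T - 1)) := by
        rw [PySem.Str.isIn, pvPipe4, pvSeedL]
      have hisin10 : PySem.Str.isIn "||||||||||" (PySem.Str.slice pat (some (T : Int)) none)
          = PySem.Chars.isIn (List.replicate 10 '|') (pat.toList.drop T) := by
        rw [PySem.Str.isIn, pvPipe10, pvThreeL]
      cases hLast : (((pvRuns pat.toList 0 []).filter
          (fun r => decide (4 ≤ min (r.1 + r.2) T - max r.1 1))).map
          (fun r => min (r.1 + r.2) T - 1)).getLast? with
      | none =>
        have hfalse := pvSeed_none pat.toList T hT8 (List.getLast?_eq_none_iff.mp hLast)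
        rw [hisin4, hfalse]
        rfl
      | some E =>
        obtain ⟨hE4, hET, hElen, hrfind, htrue⟩ := pvSeed_some pat.toList T E hT8 hLast
        rw [hisin4, htrue]
        simp only [Bool.not_true, Bool.false_eq_true, if_false]
        cases h3 : pvFirstThree (pvRuns pat.toList 0 []) T with
        | none =>
          have hfalse := pvThree_none pat.toList T h3
          rw [hisin10, hfalse]
          rfl
        | some thr =>
          obtain ⟨hTthr, hthrlen, hfind, htrue10⟩ := pvThree_some pat.toList T thr h3
          rw [hisin10, htrue10]
          simp only [Bool.not_true, Bool.false_eq_true, if_false]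
          have hrfind' : PySem.Str.rfind (PySem.Str.slice pat (some 1) (some (T : Int))) "||||"
              = ((E - 4 : Nat) : Int) := by
            rw [PySem.Str.rfind, pvPipe4, pvSeedL]
            exact hrfind
          have hfind' : PySem.Str.find (PySem.Str.slice pat (some (T : Int)) none) "||||||||||"
              = ((thr - T : Nat) : Int) := by
            rw [PySem.Str.find, pvPipe10, pvThreeL]
            exact hfind
          rw [hrfind', hfind']
          have hstart : (1 + ((E - 4 : Nat) : Int) + 3) + 1 = ((E + 1 : Nat) : Int) := by
            push_cast [Nat.cast_sub (by omega : 4 ≤ E)]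
            ring
          have hend : ((T : Nat) : Int) + ((thr - T : Nat) : Int) = ((thr : Nat) : Int) := by
            push_cast [Nat.cast_sub hTthr]
            ring
          rw [hstart, hend]
          by_cases hcmp : E + 1 > thr
          · rw [if_pos (by exact_mod_cast hcmp), if_pos hcmp]
          · rw [if_neg (by exact_mod_cast hcmp), if_neg hcmp]
            have hsl : ∀ s : String, (PySem.Str.slice s (some ((E + 1 : Nat) : Int)) (some ((thr : Nat) : Int))).toList
                = PySem.List.slice s.toList (some ((E + 1 : Nat) : Int)) (some ((thr : Nat) : Int)) := by
              intro s
              simp only [PySem.Str.slice, String.toList_ofList, PySem.Chars.slice_eq_listSlice]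
            rw [pvStrLen2, pvStrLen2, hsl, hsl]


-- ===== VERDICT (by name: the statement is the Claim_ definition above) =====
theorem check_bartel_filters_spec : Claim_equal_check_bartel_filters := by
  intro row _
  exact pv_main row
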